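-- pv_equiv track=rewrite | github.com/chenye95/LeetCode_Progress | 473_MatchSticksSquare.py | can_make_square_simulation
-- ===== SOURCE A (Python) =====
-- from typing import List, Dict
--
-- def can_make_square_simulation(match_sticks: List[int], n_sides: int = 4) -> bool:
--     """
--     :param match_sticks: 1 <= len(match_sticks) <= 15 matches with 1 <= match_sticks[i] <= 1e8, to make square
--     :param n_sides: default to 4, square
--     :return: match sticks can be used to make a square
--     """
--     if not match_sticks or sum(match_sticks) % n_sides != 0:
--         return False
--
--     side_len = sum(match_sticks) // n_sides
--     n_matches = len(match_sticks)
--     memory: Dict[int, bool] = {}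
--
--     def build_one_side(used_match_bit: int, side_finished: int, current_side_len: int) -> bool:
--         """
--         Build the sides of the shape sequentially, using previously unused matches
--
--         :param used_match_bit: binary mask to represent which match is available (1)
--         :param side_finished: number of sides finished before placing the last match
--         :param current_side_len: sum of all matches used previously mod side_len
--         :return: from current state, whether it's possible to finish the square
--         """
--         if current_side_len == 0:
--             side_finished += 1
--         if side_finished == n_sides - 1:
--             # sum(match_stick) == current_side_len + side_len
--             # all remaining matches will form the last side
--             return True
--
--         if used_match_bit not in memory:
--             # calculate remaining length on current side
--             remainder = side_len - current_side_len
--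
--             flag_doable = False
--             for i, match_len in enumerate(match_sticks):
--                 bit_i = n_matches - 1 - i
--                 if match_len <= remainder and used_match_bit & (1 << bit_i):
--                     if build_one_side(used_match_bit ^ (1 << bit_i), side_finished,
--                                       (current_side_len + match_len) % side_len):
--                         flag_doable = True
--                         break
--
--             memory[used_match_bit] = flag_doable
--
--         return memory[used_match_bit]
--
--     return build_one_side((1 << n_matches) - 1, -1, 0)
-- ===== SOURCE B (Python) =====
-- def can_make_square_simulation(match_sticks, n_sides=4):
--     """Iterative re-implementation: the recursive memoized DFS is replaced by an
--     explicit-stack state machine (defunctionalised CALL/SCAN/RET control)."""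
--     if not match_sticks or sum(match_sticks) % n_sides != 0:
--         return False
--     side_len = sum(match_sticks) // n_sides
--     n = len(match_sticks)
--     memo = {}
--     CALL, SCAN, RET = 0, 1, 2
--     tag = CALL
--     call_args = ((1 << n) - 1, -1, 0)
--     ret_val = False
--     stack = []  # frames: [mask, sides_finished, current_len, next_index]
--     while True:
--         if tag == CALL:
--             mask, fin, cur = call_args
--             if cur == 0:
--                 fin += 1
--             if fin == n_sides - 1:
--                 tag, ret_val = RET, True
--             elif mask in memo:
--                 tag, ret_val = RET, memo[mask]
--             else:
--                 stack.append([mask, fin, cur, 0])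
--                 tag = SCAN
--         elif tag == SCAN:
--             mask, fin, cur, i = stack[-1]
--             while i < n and not (match_sticks[i] <= side_len - cur
--                                  and mask & (1 << (n - 1 - i))):
--                 i += 1
--             if i == n:
--                 memo[mask] = False
--                 stack.pop()
--                 tag, ret_val = RET, False
--             else:
--                 stack[-1][3] = i + 1
--                 tag = CALL
--                 call_args = (mask ^ (1 << (n - 1 - i)), fin,
--                              (cur + match_sticks[i]) % side_len)
--         else:  # RET: hand the result down to the frame below
--             if not stack:
--                 return ret_val
--             if ret_val:
--                 memo[stack[-1][0]] = True
--                 stack.pop()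
--             else:
--                 tag = SCAN
-- ===== Notes on version B (the rewrite author's own statement) =====
-- stated objective: alternative
-- what changed: The recursive memoized DFS (build_one_side) is replaced by an iterative explicit-stack state machine: defunctionalised CALL/SCAN/RET control with a frame stack [mask, sides_finished, current_len, next_index], threading the same memo table, so no Python recursion is used.
import Mathlib
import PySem

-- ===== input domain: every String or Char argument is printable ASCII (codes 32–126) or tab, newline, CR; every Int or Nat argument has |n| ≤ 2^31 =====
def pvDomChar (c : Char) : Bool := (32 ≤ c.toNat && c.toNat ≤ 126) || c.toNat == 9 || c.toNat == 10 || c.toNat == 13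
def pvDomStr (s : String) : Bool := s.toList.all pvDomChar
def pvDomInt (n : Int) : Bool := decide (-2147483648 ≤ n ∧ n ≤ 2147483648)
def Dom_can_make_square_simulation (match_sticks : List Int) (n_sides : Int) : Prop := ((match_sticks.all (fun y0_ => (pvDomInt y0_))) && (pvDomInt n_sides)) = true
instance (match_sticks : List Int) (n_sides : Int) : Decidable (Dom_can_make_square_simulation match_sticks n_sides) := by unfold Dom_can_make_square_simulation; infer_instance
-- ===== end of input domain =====

-- B replaces A's recursive memoized DFS by an iterative explicit-stack state machine
-- (defunctionalised CALL/SCAN/RET control) over the same states; objective: alternative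
-- decomposition, same return value (return-value equivalence; neither mutates its input).

-- ===== PORT A =====
-- Python's enumerate(match_sticks), hand-ported with Nat indices (exact: indices are 0..n-1 ≥ 0)
def pvEnum (s : Nat) : List Int → List (Nat × Int)
  | [] => []
  | x :: xs => (s, x) :: pvEnum (s + 1) xs

-- build_one_side, with a fuel argument making the recursion structural: each recursive call
-- clears one set bit of the mask, so fuel n+2 (> set-bit count + 1) is never exhausted.
mutual
def pvBuildA (sticks : List Int) (n : Nat) (nS L : Int) (fuel : Nat) (mask : Nat)
    (sfin0 cur : Int) (mem : PySem.Dict Nat Bool) : Bool × PySem.Dict Nat Bool :=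
  match fuel with
  | 0 => (false, mem)  -- unreachable with the fuel supplied below
  | fuel' + 1 =>
    -- if current_side_len == 0: side_finished += 1
    let sfin : Int := if cur = 0 then sfin0 + 1 else sfin0
    if sfin = nS - 1 then (true, mem)
    else
      match PySem.Dict.get? mem mask with
      | some v => (v, mem)  -- used_match_bit in memory
      | none =>
        -- the for-loop over enumerate(match_sticks) with break, threading memory
        let r := pvLoopA sticks n nS L fuel' (pvEnum 0 sticks) mask sfin cur mem
        let mem2 := PySem.Dict.insert r.2 mask r.1  -- memory[used_match_bit] = flag_doable
        (PySem.Dict.getD mem2 mask false, mem2)     -- return memory[used_match_bit] (just stored)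
termination_by (fuel, 0)

def pvLoopA (sticks : List Int) (n : Nat) (nS L : Int) (fuel : Nat) (l : List (Nat × Int))
    (mask : Nat) (sfin cur : Int) (mem : PySem.Dict Nat Bool) : Bool × PySem.Dict Nat Bool :=
  match l with
  | [] => (false, mem)  -- loop finished without break: flag_doable = False
  | (i, m) :: rest =>
    if m ≤ L - cur ∧ mask &&& (1 <<< (n - 1 - i)) ≠ 0 then
      let r := pvBuildA sticks n nS L fuel (mask ^^^ (1 <<< (n - 1 - i))) sfin
        (PySem.Int.mod (cur + m) L) mem
      if r.1 then (true, r.2)  -- flag_doable = True; break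
      else pvLoopA sticks n nS L fuel rest mask sfin cur r.2
    else pvLoopA sticks n nS L fuel rest mask sfin cur mem
termination_by (fuel, l.length + 1)
end

def can_make_square_simulation (match_sticks : List Int) (n_sides : Int) : Bool :=
  if match_sticks = [] ∨ PySem.Int.mod match_sticks.sum n_sides ≠ 0 then false
  else
    let side_len := PySem.Int.floordiv match_sticks.sum n_sides
    let n := match_sticks.length
    (pvBuildA match_sticks n n_sides side_len (n + 2) ((1 <<< n) - 1) (-1) 0 PySem.Dict.empty).1

-- ===== PORT B =====
-- Source B's state machine: tag CALL (pending call), SCAN (resume top frame's loop), RET (propagate)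
inductive PvTag where
  | call : Nat → Int → Int → PvTag
  | scan : PvTag
  | ret  : Bool → PvTag

-- machine state: tag, frame stack [mask, side_finished, current_len, next_index], memo
abbrev PvMState := PvTag × List (Nat × Int × Int × Nat) × PySem.Dict Nat Bool

-- one iteration of Source B's while-loop
-- the test of Source B's inner scan loop, as one named Bool predicate on an (index, length) pair
def pvPred (n : Nat) (L cur : Int) (mask : Nat) (p : Nat × Int) : Bool :=
  decide (p.2 ≤ L - cur ∧ mask &&& (1 <<< (n - 1 - p.1)) ≠ 0)

def pvStep (sticks : List Int) (n : Nat) (nS L : Int) : PvMState → PvMState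
  | (.call mask fin0 cur, K, mem) =>
    let fin : Int := if cur = 0 then fin0 + 1 else fin0
    if fin = nS - 1 then (.ret true, K, mem)
    else
      match PySem.Dict.get? mem mask with
      | some v => (.ret v, K, mem)
      | none => (.scan, (mask, fin, cur, 0) :: K, mem)
  | (.scan, [], mem) => (.ret false, [], mem)  -- unreachable: SCAN always has a top frame
  | (.scan, (mask, fin, cur, i) :: K, mem) =>
    -- Source B's inner `while i < n and not (...): i += 1` = first index ≥ i passing the test
    match ((pvEnum 0 sticks).drop i).find? (pvPred n L cur mask) with
    | none => (.ret false, K, PySem.Dict.insert mem mask false)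
    | some (j, m) =>
      (.call (mask ^^^ (1 <<< (n - 1 - j))) fin (PySem.Int.mod (cur + m) L),
       (mask, fin, cur, j + 1) :: K, mem)
  | (.ret b, [], mem) => (.ret b, [], mem)  -- Source B has returned; modelled as a sink state
  | (.ret true, (mask, _, _, _) :: K, mem) => (.ret true, K, PySem.Dict.insert mem mask true)
  | (.ret false, F :: K, mem) => (.scan, F :: K, mem)

def pvFinal : PvMState → Bool
  | (.ret _, [], _) => true
  | (.ret _, _ :: _, _) => false
  | (.scan, _, _) => false
  | (.call _ _ _, _, _) => false

-- run the while-loop: fuel makes it structural; once Source B would have returned the state is kept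
def pvIter (sticks : List Int) (n : Nat) (nS L : Int) : Nat → PvMState → PvMState
  | 0, s => s
  | f + 1, s => if pvFinal s then s else pvIter sticks n nS L f (pvStep sticks n nS L s)

-- fuel bound: enough iterations for a call whose mask has < fuel set bits (proved below)
def pvCost (n : Nat) : Nat → Nat
  | 0 => 1
  | f + 1 => n * (pvCost n f + 2) + 2

def can_make_square_simulation_alt (match_sticks : List Int) (n_sides : Int) : Bool :=
  if match_sticks = [] ∨ PySem.Int.mod match_sticks.sum n_sides ≠ 0 then false
  else
    let side_len := PySem.Int.floordiv match_sticks.sum n_sides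
    let n := match_sticks.length
    match pvIter match_sticks n n_sides side_len (pvCost n (n + 2) + 1)
        (.call ((1 <<< n) - 1) (-1) 0, [], PySem.Dict.empty) with
    | (.ret b, [], _) => b  -- the `return ret_val` of Source B's while-loop
    | _ => false            -- unreachable: the fuel suffices (proved below)

-- ===== PRECONDITION & SPEC =====
-- Pre_ is exactly the set of inputs on which the Python A returns: on a nonempty list A raises
-- ZeroDivisionError when n_sides == 0 (sum % 0), or when the total is 0 and n_sides ∉ {0, 1}
-- (side_len == 0 and the recursion reaches `% side_len`).
def Pre_can_make_square_simulation (match_sticks : List Int) (n_sides : Int) : Prop :=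
  match_sticks = [] ∨ (n_sides ≠ 0 ∧ (match_sticks.sum ≠ 0 ∨ n_sides = 1))
instance (match_sticks : List Int) (n_sides : Int) : Decidable (Pre_can_make_square_simulation match_sticks n_sides) := by unfold Pre_can_make_square_simulation; infer_instance

def pvWitness_can_make_square_simulation : List Int × Int := ([1, 1, 1, 1], 4)

def Spec_can_make_square_simulation (match_sticks : List Int) (n_sides : Int) (out : Bool) : Prop := out = can_make_square_simulation_alt match_sticks n_sides
instance (match_sticks : List Int) (n_sides : Int) (out : Bool) : Decidable (Spec_can_make_square_simulation match_sticks n_sides out) := by unfold Spec_can_make_square_simulation; infer_instance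

-- ===== CLAIM (what is proved, stated in full; the proofs are below) =====
def Claim_equal_can_make_square_simulation : Prop := ∀ (match_sticks : List Int) (n_sides : Int), Dom_can_make_square_simulation match_sticks n_sides → Pre_can_make_square_simulation match_sticks n_sides → Spec_can_make_square_simulation match_sticks n_sides (can_make_square_simulation match_sticks n_sides)

-- ===== LEMMAS AND PROOFS =====

-- `pvEnum` facts
theorem pvEnum_length (s : Nat) (xs : List Int) : (pvEnum s xs).length = xs.length := by
  induction xs generalizing s with
  | nil => rfl
  | cons x xs ih => simp [pvEnum, ih]

theorem pvEnum_drop (xs : List Int) : ∀ (s i : Nat), (pvEnum s xs).drop i = pvEnum (s + i) (xs.drop i) := by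
  induction xs with
  | nil => intro s i; simp [pvEnum]
  | cons x xs ih =>
    intro s i
    cases i with
    | zero => simp [pvEnum]
    | succ i =>
      simp only [pvEnum, List.drop_succ_cons, ih (s + 1) i]
      congr 1
      omega

-- set-bit count below n
def pvBits (n mask : Nat) : Nat :=
  match n with
  | 0 => 0
  | n + 1 => pvBits n mask + (if mask.testBit n then 1 else 0)

theorem pvBits_le (n mask : Nat) : pvBits n mask ≤ n := by
  induction n with
  | zero => simp [pvBits]
  | succ n ih => simp only [pvBits]; split <;> omega

theorem pvBits_congr (n : Nat) (m1 m2 : Nat) (h : ∀ j, j < n → m1.testBit j = m2.testBit j) :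
    pvBits n m1 = pvBits n m2 := by
  induction n with
  | zero => rfl
  | succ n ih =>
    simp only [pvBits, ih (fun j hj => h j (by omega)), h n (by omega)]

theorem pvTestBit_xor_pow (m b j : Nat) :
    (m ^^^ (1 <<< b)).testBit j = ((m.testBit j) != decide (b = j)) := by
  rw [Nat.testBit_xor, Nat.one_shiftLeft, Nat.testBit_two_pow]

theorem pvBits_xor (n mask b : Nat) (hb : b < n) (h : mask.testBit b = true) :
    pvBits n (mask ^^^ (1 <<< b)) + 1 = pvBits n mask := by
  induction n with
  | zero => omega
  | succ n ih =>
    rcases Nat.lt_succ_iff_lt_or_eq.mp hb with hb' | hb'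
    · have h2 : (mask ^^^ (1 <<< b)).testBit n = mask.testBit n := by
        rw [pvTestBit_xor_pow]; simp [show ¬ (b = n) by omega]
      simp only [pvBits, h2]
      have := ih hb'
      omega
    · subst hb'
      have h1 : pvBits b (mask ^^^ (1 <<< b)) = pvBits b mask := by
        apply pvBits_congr
        intro j hj
        rw [pvTestBit_xor_pow]
        simp [show ¬ (b = j) by omega]
      have h3 : (mask ^^^ (1 <<< b)).testBit b = false := by
        rw [pvTestBit_xor_pow]; simp [h]
      simp only [pvBits, h1, h3, h]
      simp

theorem pvAnd_pow_ne (mask b : Nat) (h : mask &&& (1 <<< b) ≠ 0) : mask.testBit b = true := by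
  rw [Nat.one_shiftLeft] at h
  rw [Nat.and_two_pow] at h
  cases hb : mask.testBit b
  · rw [hb] at h; simp at h
  · rfl

-- machine-run algebra
theorem pvIter_sink (sticks : List Int) (n : Nat) (nS L : Int) (f : Nat) (s : PvMState)
    (h : pvFinal s = true) : pvIter sticks n nS L f s = s := by
  induction f with
  | zero => rfl
  | succ f ih => simp [pvIter, h]

theorem pvIter_add (sticks : List Int) (n : Nat) (nS L : Int) (a b : Nat) (s : PvMState) :
    pvIter sticks n nS L (a + b) s = pvIter sticks n nS L b (pvIter sticks n nS L a s) := by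
  induction a generalizing s with
  | zero => rw [Nat.zero_add]; rfl
  | succ a ih =>
    have hab : a + 1 + b = (a + b) + 1 := by omega
    rw [hab]
    by_cases h : pvFinal s = true
    · rw [pvIter_sink _ _ _ _ _ _ h, pvIter_sink _ _ _ _ _ _ h, pvIter_sink _ _ _ _ _ _ h]
    · have h' : pvFinal s = false := by revert h; cases pvFinal s <;> simp
      simp only [pvIter, h', Bool.false_eq_true, if_false]
      exact ih _

-- the main simulation: from a CALL state the machine reaches, in at most pvCost n fuel steps,
-- the RET state carrying exactly pvBuildA's result and memo, with the stack restored.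
theorem pvSimLoop (sticks : List Int) (n : Nat) (nS L : Int) (hn : n = sticks.length) (fuel : Nat)
    (IH : ∀ (mask : Nat) (fin cur : Int) (mem : PySem.Dict Nat Bool)
        (K : List (Nat × Int × Int × Nat)), pvBits n mask < fuel →
        ∃ a ≤ pvCost n fuel,
          pvIter sticks n nS L a (.call mask fin cur, K, mem)
            = (.ret (pvBuildA sticks n nS L fuel mask fin cur mem).1, K,
               (pvBuildA sticks n nS L fuel mask fin cur mem).2)) :
    ∀ (l : List (Nat × Int)) (i0 mask : Nat) (fin cur : Int) (mem : PySem.Dict Nat Bool)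
      (K : List (Nat × Int × Int × Nat)),
      l = (pvEnum 0 sticks).drop i0 →
      pvBits n mask < fuel + 1 →
      ∃ a ≤ l.length * (pvCost n fuel + 2) + 1,
        pvIter sticks n nS L a (.scan, (mask, fin, cur, i0) :: K, mem)
          = (.ret (pvLoopA sticks n nS L fuel l mask fin cur mem).1, K,
             PySem.Dict.insert (pvLoopA sticks n nS L fuel l mask fin cur mem).2 mask
               (pvLoopA sticks n nS L fuel l mask fin cur mem).1) := by
  intro l
  induction l with
  | nil =>
    intro i0 mask fin cur mem K hl hbits
    refine ⟨1, by omega, ?_⟩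
    have hfind : ((pvEnum 0 sticks).drop i0).find? (pvPred n L cur mask) = none := by
      rw [← hl]; rfl
    simp [pvIter, pvFinal, pvStep, hfind, pvLoopA]
  | cons hd rest ih =>
    intro i0 mask fin cur mem K hl hbits
    obtain ⟨j, m⟩ := hd
    -- decode the head: j = i0 < n, rest = (pvEnum 0 sticks).drop (j + 1)
    have hdrop : (pvEnum 0 sticks).drop i0 = pvEnum i0 (sticks.drop i0) := by
      simpa using pvEnum_drop sticks 0 i0
    have hne : sticks.drop i0 ≠ [] := by
      intro h0
      rw [hdrop, h0] at hl
      simp [pvEnum] at hl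
    obtain ⟨y, ys, hys⟩ := List.exists_cons_of_ne_nil hne
    have hji : j = i0 ∧ m = y ∧ rest = pvEnum (i0 + 1) ys := by
      rw [hdrop, hys] at hl
      simp [pvEnum] at hl
      exact ⟨hl.1.1, hl.1.2, hl.2⟩
    obtain ⟨hj, hm, hrest⟩ := hji
    subst hj; subst hm
    have hrest' : rest = (pvEnum 0 sticks).drop (j + 1) := by
      have ht : sticks.drop (j + 1) = ys := by
        rw [← List.tail_drop, hys]; rfl
      rw [pvEnum_drop, ht, hrest]
      simp
    have hjn : j < n := by
      rw [hn]
      by_contra hge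
      exact hne (List.drop_eq_nil_of_le (by omega))
    by_cases hpred : m ≤ L - cur ∧ mask &&& (1 <<< (n - 1 - j)) ≠ 0
    · -- candidate: the machine calls the child, exactly as the loop body does
      have hfind : ((pvEnum 0 sticks).drop j).find? (pvPred n L cur mask) = some (j, m) := by
        rw [← hl]
        exact List.find?_cons_of_pos (by simp [pvPred, hpred])
      have hbit : mask.testBit (n - 1 - j) = true := pvAnd_pow_ne _ _ hpred.2
      have hchild : pvBits n (mask ^^^ (1 <<< (n - 1 - j))) < fuel := by
        have := pvBits_xor n mask (n - 1 - j) (by omega) hbit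
        omega
      obtain ⟨b, hb, hiterb⟩ := IH (mask ^^^ (1 <<< (n - 1 - j))) fin
        (PySem.Int.mod (cur + m) L) mem ((mask, fin, cur, j + 1) :: K) hchild
      set r := pvBuildA sticks n nS L fuel (mask ^^^ (1 <<< (n - 1 - j))) fin
        (PySem.Int.mod (cur + m) L) mem with hr
      have hstep1 : pvIter sticks n nS L 1 (.scan, (mask, fin, cur, j) :: K, mem)
          = (.call (mask ^^^ (1 <<< (n - 1 - j))) fin (PySem.Int.mod (cur + m) L),
             (mask, fin, cur, j + 1) :: K, mem) := by
        simp [pvIter, pvFinal, pvStep, hfind]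
      cases hr1 : r.1
      · -- child returned False: resume the scan at j+1
        obtain ⟨a', ha', hitera'⟩ := ih (j + 1) mask fin cur r.2 K hrest' hbits
        refine ⟨1 + b + 1 + a', ?_, ?_⟩
        · have hmul : ((j, m) :: rest).length * (pvCost n fuel + 2)
              = rest.length * (pvCost n fuel + 2) + (pvCost n fuel + 2) := by
            simp [List.length_cons, Nat.succ_mul]
          omega
        · rw [pvIter_add, pvIter_add, pvIter_add, hstep1, hiterb]
          have hstep2 : pvIter sticks n nS L 1
              (.ret r.1, (mask, fin, cur, j + 1) :: K, r.2)
                = (.scan, (mask, fin, cur, j + 1) :: K, r.2) := by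
            rw [hr1]; simp [pvIter, pvFinal, pvStep]
          rw [hstep2, hitera']
          have hloop : pvLoopA sticks n nS L fuel ((j, m) :: rest) mask fin cur mem
              = pvLoopA sticks n nS L fuel rest mask fin cur r.2 := by
            rw [pvLoopA]
            simp only [if_pos hpred, ← hr, hr1]
            simp
          rw [hloop]
      · -- child returned True: pop, memoise True — the break
        refine ⟨1 + b + 1, by
          have hmul : ((j, m) :: rest).length * (pvCost n fuel + 2)
              = rest.length * (pvCost n fuel + 2) + (pvCost n fuel + 2) := by
            simp [List.length_cons, Nat.succ_mul]
          omega, ?_⟩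
        rw [pvIter_add, pvIter_add, hstep1, hiterb]
        have hstep2 : pvIter sticks n nS L 1
            (.ret r.1, (mask, fin, cur, j + 1) :: K, r.2)
              = (.ret true, K, PySem.Dict.insert r.2 mask true) := by
          rw [hr1]; simp [pvIter, pvFinal, pvStep]
        rw [hstep2]
        have hloop : pvLoopA sticks n nS L fuel ((j, m) :: rest) mask fin cur mem = (true, r.2) := by
          rw [pvLoopA]
          simp only [if_pos hpred, ← hr, hr1]
          simp
        rw [hloop]
    · -- not a candidate: the machine's scan and the loop both skip to index j+1
      obtain ⟨a', ha', hitera'⟩ := ih (j + 1) mask fin cur mem K hrest' hbits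
      have hloop : pvLoopA sticks n nS L fuel ((j, m) :: rest) mask fin cur mem
          = pvLoopA sticks n nS L fuel rest mask fin cur mem := by
        rw [pvLoopA]; simp [if_neg hpred]
      -- the two scan states (index j vs index j+1 … ) make the same first step
      have hstepeq : pvStep sticks n nS L (.scan, (mask, fin, cur, j) :: K, mem)
          = pvStep sticks n nS L (.scan, (mask, fin, cur, j + 1) :: K, mem) := by
        have hfind : ((pvEnum 0 sticks).drop j).find? (pvPred n L cur mask)
              = ((pvEnum 0 sticks).drop (j + 1)).find? (pvPred n L cur mask) := by
          rw [← hl, ← hrest']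
          exact List.find?_cons_of_neg (by simp [pvPred, hpred])
        simp only [pvStep, hfind]
      -- a' ≥ 1 (a scan state is never a ret state), so the first steps can be aligned
      cases a' with
      | zero =>
        exfalso
        simp [pvIter] at hitera'
      | succ a'' =>
        refine ⟨a'' + 1, ?_, ?_⟩
        · have hmul : ((j, m) :: rest).length * (pvCost n fuel + 2)
              = rest.length * (pvCost n fuel + 2) + (pvCost n fuel + 2) := by
            simp [List.length_cons, Nat.succ_mul]
          omega
        · rw [hloop]
          have e1 : pvIter sticks n nS L (a'' + 1) (.scan, (mask, fin, cur, j) :: K, mem)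
              = pvIter sticks n nS L a'' (pvStep sticks n nS L (.scan, (mask, fin, cur, j) :: K, mem)) := by
            simp [pvIter, pvFinal]
          have e2 : pvIter sticks n nS L (a'' + 1) (.scan, (mask, fin, cur, j + 1) :: K, mem)
              = pvIter sticks n nS L a'' (pvStep sticks n nS L (.scan, (mask, fin, cur, j + 1) :: K, mem)) := by
            simp [pvIter, pvFinal]
          rw [e1, hstepeq, ← e2, hitera']

theorem pvSim (sticks : List Int) (n : Nat) (nS L : Int) (hn : n = sticks.length) :
    ∀ (fuel : Nat) (mask : Nat) (fin cur : Int) (mem : PySem.Dict Nat Bool)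
      (K : List (Nat × Int × Int × Nat)), pvBits n mask < fuel →
      ∃ a ≤ pvCost n fuel,
        pvIter sticks n nS L a (.call mask fin cur, K, mem)
          = (.ret (pvBuildA sticks n nS L fuel mask fin cur mem).1, K,
             (pvBuildA sticks n nS L fuel mask fin cur mem).2) := by
  intro fuel
  induction fuel with
  | zero => intro mask fin cur mem K h; omega
  | succ fuel ih =>
    intro mask fin cur mem K h
    by_cases hacc : (if cur = 0 then fin + 1 else fin) = nS - 1
    · refine ⟨1, by simp only [pvCost]; omega, ?_⟩
      simp [pvIter, pvFinal, pvStep, pvBuildA, hacc]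
    · cases hget : PySem.Dict.get? mem mask with
      | some v =>
        refine ⟨1, by simp only [pvCost]; omega, ?_⟩
        simp [pvIter, pvFinal, pvStep, pvBuildA, hacc, hget]
      | none =>
        have hl0 : pvEnum 0 sticks = (pvEnum 0 sticks).drop 0 := rfl
        obtain ⟨a', ha', hitera'⟩ := pvSimLoop sticks n nS L hn fuel ih (pvEnum 0 sticks) 0 mask
          (if cur = 0 then fin + 1 else fin) cur mem K hl0 (by omega)
        refine ⟨1 + a', ?_, ?_⟩
        · have hlen : (pvEnum 0 sticks).length = n := by rw [pvEnum_length, hn]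
          rw [hlen] at ha'
          simp only [pvCost]
          omega
        · rw [pvIter_add]
          have hstep1 : pvIter sticks n nS L 1 (.call mask fin cur, K, mem)
              = (.scan, (mask, if cur = 0 then fin + 1 else fin, cur, 0) :: K, mem) := by
            simp [pvIter, pvFinal, pvStep, hacc, hget]
          rw [hstep1, hitera']
          -- unfold pvBuildA once on the memo-miss branch
          conv_rhs => rw [pvBuildA]
          simp only [if_neg hacc, hget]
          rw [PySem.Dict.getD_insert_self]

-- assembling the verdict
theorem can_make_square_simulation_eq_alt (match_sticks : List Int) (n_sides : Int) :
    can_make_square_simulation match_sticks n_sides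
      = can_make_square_simulation_alt match_sticks n_sides := by
  unfold can_make_square_simulation can_make_square_simulation_alt
  by_cases hg : match_sticks = [] ∨ PySem.Int.mod match_sticks.sum n_sides ≠ 0
  · simp [hg]
  · simp only [if_neg hg]
    set n := match_sticks.length with hn
    set L := PySem.Int.floordiv match_sticks.sum n_sides with hL
    obtain ⟨a, ha, hiter⟩ := pvSim match_sticks n n_sides L hn (n + 2) ((1 <<< n) - 1) (-1) 0
      PySem.Dict.empty [] (by have := pvBits_le n ((1 <<< n) - 1); omega)
    have hsplit : pvCost n (n + 2) + 1 = a + (pvCost n (n + 2) + 1 - a) := by omega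
    rw [hsplit, pvIter_add, hiter, pvIter_sink _ _ _ _ _ _ rfl]

-- ===== VERDICT (by name: the statement is the Claim_ definition above) =====
theorem can_make_square_simulation_spec : Claim_equal_can_make_square_simulation := by
  intro match_sticks n_sides _ _
  unfold Spec_can_make_square_simulation
  exact can_make_square_simulation_eq_alt match_sticks n_sides
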